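-- pv_equiv track=rewrite | github.com/lincannm/ZHIHUISHU-Auto-Answer-Assistant | browser_session.py | _group_cookies_by_host
-- ===== SOURCE A (Python) =====
-- from collections import defaultdict
--
-- def _group_cookies_by_host(cookies, fallback_host):
--     grouped = defaultdict(list)
--     for cookie in cookies:
--         host = cookie.get("domain", "").lstrip(".") or fallback_host
--         if not host:
--             continue
--         grouped[host].append(cookie)
--     return grouped
-- ===== SOURCE B (Python) =====
-- from collections import defaultdict
--
-- def _group_cookies_by_host(cookies, fallback_host):
--     # B: compute hosts once, collect distinct non-empty hosts in first-occurrence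
--     # order, then build each host's cookie list by a filter pass per host.
--     hosts = [(c.get("domain", "").lstrip(".") or fallback_host) for c in cookies]
--     seen = []
--     for h in hosts:
--         if h and h not in seen:
--             seen.append(h)
--     grouped = defaultdict(list)
--     for h in seen:
--         grouped[h] = [c for c, ch in zip(cookies, hosts) if ch == h]
--     return grouped
-- ===== Notes on version B (the rewrite author's own statement) =====
-- stated objective: alternative
-- what changed: B replaces A's incremental defaultdict-append loop by a two-phase plan: map each cookie to its host, dedup the non-empty hosts in first-occurrence order, then build each host's group with one filter pass per host.
import Mathlib
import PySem

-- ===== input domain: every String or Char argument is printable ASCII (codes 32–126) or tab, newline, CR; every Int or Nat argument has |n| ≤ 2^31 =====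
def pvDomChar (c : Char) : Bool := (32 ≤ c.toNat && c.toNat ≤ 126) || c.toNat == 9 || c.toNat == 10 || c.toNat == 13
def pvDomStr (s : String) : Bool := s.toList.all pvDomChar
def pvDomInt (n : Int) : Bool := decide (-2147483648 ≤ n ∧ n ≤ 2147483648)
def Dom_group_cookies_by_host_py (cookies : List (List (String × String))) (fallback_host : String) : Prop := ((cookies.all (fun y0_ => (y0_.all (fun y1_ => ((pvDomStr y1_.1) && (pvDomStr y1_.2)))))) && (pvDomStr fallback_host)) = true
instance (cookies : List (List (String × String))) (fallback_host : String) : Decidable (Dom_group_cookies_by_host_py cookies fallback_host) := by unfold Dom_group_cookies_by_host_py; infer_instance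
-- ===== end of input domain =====

-- B regroups by deduplicating the non-empty hosts in first-occurrence order and filtering the cookie list once per host, instead of A's incremental defaultdict-append loop (alternative decomposition, same result).


-- ===== PORT A =====
-- host = cookie.get("domain", "").lstrip(".") or fallback_host   (shared by both ports: the same
-- expression appears verbatim in A's loop and in B's list comprehension).
-- ".lstrip('.')" is ported by hand as dropWhile of '.' — exact: a one-character strip set, compared by code point.
def pvHostOf (cookie : List (String × String)) (fallback_host : String) : String :=
  let d := (PySem.Dict.ofList cookie).getD "domain" ""
  let s := String.ofList (d.toList.dropWhile (fun ch => ch == '.'))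
  if s = "" then fallback_host else s

def group_cookies_by_host_py (cookies : List (List (String × String))) (fallback_host : String) : List (String × List (List (String × String))) :=
  (cookies.foldl (fun grouped cookie =>
      let host := pvHostOf cookie fallback_host
      if host = "" then grouped
      else grouped.modify host [] (fun l => l ++ [cookie]))
    PySem.Dict.empty).items

-- ===== PORT B =====
def group_cookies_by_host_py_alt (cookies : List (List (String × String))) (fallback_host : String) : List (String × List (List (String × String))) :=
  let hosts := cookies.map (fun c => pvHostOf c fallback_host)
  let seen := hosts.foldl (fun s h => if h = "" then s else PySem.Set.add s h) []
  seen.map (fun h => (h, ((cookies.zip hosts).filter (fun p => p.2 == h)).map (fun p => p.1)))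

-- ===== PRECONDITION & SPEC =====
def Spec_group_cookies_by_host_py (cookies : List (List (String × String))) (fallback_host : String) (out : List (String × List (List (String × String)))) : Prop := out = group_cookies_by_host_py_alt cookies fallback_host
instance (cookies : List (List (String × String))) (fallback_host : String) (out : List (String × List (List (String × String)))) : Decidable (Spec_group_cookies_by_host_py cookies fallback_host out) := by unfold Spec_group_cookies_by_host_py; infer_instance

-- ===== CLAIM (what is proved, stated in full; the proofs are below) =====
def Claim_equal_group_cookies_by_host_py : Prop := ∀ (cookies : List (List (String × String))) (fallback_host : String), Dom_group_cookies_by_host_py cookies fallback_host → Spec_group_cookies_by_host_py cookies fallback_host (group_cookies_by_host_py cookies fallback_host)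

-- ===== LEMMAS AND PROOFS =====

theorem pv_zip_self_map {α β : Type} (l : List α) (f : α → β) :
    l.zip (l.map f) = l.map (fun x => (x, f x)) := by
  have := @List.zip_map' α α β id f l
  simpa using this

theorem pv_ofList_eq_foldl_add {α : Type} [BEq α] (xs : List α) :
    PySem.Set.ofList xs = xs.foldl (fun s b => PySem.Set.add s b) [] := by
  rw [← PySem.Set.update_nil_left]
  have := PySem.Set.update_map_eq_foldl_add (s := ([] : PySem.Set α)) (l := xs) (f := id)
  simpa using this

theorem group_cookies_equal (cookies : List (List (String × String))) (fallback_host : String) :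
    group_cookies_by_host_py cookies fallback_host = group_cookies_by_host_py_alt cookies fallback_host := by
  set F := fun c => pvHostOf c fallback_host with hF
  set l := cookies.filter (fun c => !(F c == "")) with hl
  -- A's guarded loop is the unguarded append loop over the cookies with a non-empty host
  have hfunA : (fun (grouped : PySem.Dict String (List (List (String × String)))) cookie =>
      let host := pvHostOf cookie fallback_host
      if host = "" then grouped else grouped.modify host [] (fun l => l ++ [cookie]))
      = (fun grouped cookie => if (!(F cookie == "")) = true then grouped.modify (F cookie) [] (fun l => l ++ [cookie]) else grouped) := by
    funext g c
    by_cases h : F c = "" <;> simp [hF, h]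
  have hd : group_cookies_by_host_py cookies fallback_host =
      (l.foldl (fun g c => g.modify (F c) [] (fun v => v ++ [c])) PySem.Dict.empty).items := by
    rw [group_cookies_by_host_py, hfunA, ← List.foldl_filter]
  set d := l.foldl (fun g c => g.modify (F c) [] (fun v => v ++ [c])) PySem.Dict.empty with hdd
  have hnodup : d.keys.Nodup := by
    apply PySem.Dict.nodup_keys_foldl_modify_key l F [] (fun _ c v => v ++ [c])
    simp [PySem.Dict.keys_empty]
  have hkeys : d.keys = PySem.Set.ofList (l.map F) := by
    rw [hdd]
    rw [PySem.Dict.keys_foldl_modify_key l F [] (fun _ c v => v ++ [c]) PySem.Dict.empty]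
    simp [PySem.Dict.keys_empty, PySem.Set.update_nil_left]
  have hgetD : ∀ k, d.getD k [] = l.filter (fun c => F c == k) := by
    intro k
    have e : d = (l.map (fun c => (F c, c))).foldl
        (fun dd p => dd.modify p.1 [] (fun v => v ++ [p.2])) PySem.Dict.empty := by
      rw [hdd, List.foldl_map]
    rw [e, PySem.Dict.getD_foldl_modify_append, List.filter_map]
    simp [List.map_map, Function.comp_def]
  rw [hd, PySem.Dict.items_eq_map_keys d hnodup [], hkeys]
  -- B's seen-loop builds the same key set
  have hseen : (cookies.map F).foldl (fun s h => if h = "" then s else PySem.Set.add s h) [] =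
      PySem.Set.ofList (l.map F) := by
    have hfunB : (fun (s : PySem.Set String) h => if h = "" then s else PySem.Set.add s h)
        = (fun s h => if (!(h == "")) = true then PySem.Set.add s h else s) := by
      funext s h
      by_cases hh : h = "" <;> simp [hh]
    rw [hfunB, ← List.foldl_filter, List.filter_map, ← pv_ofList_eq_foldl_add]
    rfl
  rw [group_cookies_by_host_py_alt]
  simp only [← hF, hseen, pv_zip_self_map cookies F]
  -- per distinct host: A's accumulated group = B's filter pass
  apply List.map_congr_left
  intro h hmem
  have hne : h ≠ "" := by
    rw [PySem.Set.mem_ofList] at hmem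
    obtain ⟨c, hc, rfl⟩ := List.mem_map.mp hmem
    rw [hl] at hc
    have := (List.mem_filter.mp hc).2
    simpa using this
  have hzf : ((cookies.map (fun x => (x, F x))).filter (fun p => p.2 == h)).map (fun p => p.1)
      = cookies.filter (fun c => F c == h) := by
    rw [List.filter_map]
    simp [Function.comp_def, List.map_map]
  rw [hzf]
  congr 1
  rw [hgetD h, hl, List.filter_filter]
  apply List.filter_congr
  intro c _
  by_cases hc : F c = h
  · simp [hc, hne]
  · simp [hc]

-- ===== VERDICT (by name: the statement is the Claim_ definition above) =====
theorem group_cookies_by_host_py_spec : Claim_equal_group_cookies_by_host_py := by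
  intro cookies fallback_host _
  exact group_cookies_equal cookies fallback_host
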